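-- pv_equiv track=rewrite | github.com/jclements3/HarpHymnal | renderers/lilypond.py | _rotate_figure_inv1
-- ===== SOURCE A (Python) =====
-- STRING_ALPHABET: dict[str, int] = {str(n): n for n in range(1, 10)}
--
-- def _rotate_figure_inv1(fig: str) -> str:
--     """Rotate a figure one step left: root moves out, 3rd becomes new bass.
--     ``'133' -> '333'``, ``'1332' -> '3323'``, ``'124' -> '242'``.  Returns
--     the input unchanged on short or unparsable figures.
--     """
--     if not fig or len(fig) < 2:
--         return fig
--     try:
--         start = STRING_ALPHABET[fig[0]]
--         positions = [start]
--         for ch in fig[1:]: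
--             positions.append(positions[-1] + int(ch) - 1)
--     except (KeyError, ValueError):
--         return fig
--     # Original intervals-between-adjacent: keep list stable.
--     intervals = [positions[i + 1] - positions[i] + 1
--                  for i in range(len(positions) - 1)]
--     new_top = positions[-1] + intervals[0] - 1
--     new_positions = positions[1:] + [new_top]
--     _INV = {v: k for k, v in STRING_ALPHABET.items()}
--     head = _INV.get(new_positions[0])
--     if head is None:  # overflow past string F (=15)
--         return fig
--     tail_chars: list[str] = []
--     for a, b in zip(new_positions, new_positions[1:]):
--         d = b - a + 1
--         if d < 1 or d > 9:
--             return fig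
--         tail_chars.append(str(d))
--     return head + ''.join(tail_chars)
-- ===== SOURCE B (Python) =====
-- def _rotate_figure_inv1(fig: str) -> str:
--     """Rotate a figure one step left: root moves out, 3rd becomes new bass.
--
--     Direct rewrite: the positions/intervals round-trip cancels, so the
--     result is just str(int(fig[0]) + int(fig[1]) - 1) + fig[2:] + fig[1],
--     guarded by the same validity checks A makes via its exceptions.
--     """
--     if len(fig) < 2 or not all('1' <= c <= '9' for c in fig):
--         return fig
--     head = int(fig[0]) + int(fig[1]) - 1
--     if head > 9:
--         return fig
--     return str(head) + fig[2:] + fig[1]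
-- ===== Notes on version B (the rewrite author's own statement) =====
-- stated objective: simpler
-- what changed: B drops the positions/intervals scan and the alphabet dicts entirely: since the round-trip of cumulative positions and adjacent differences cancels, it validates the digits once and returns str(int(fig[0])+int(fig[1])-1) + fig[2:] + fig[1] directly.
import Mathlib
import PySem

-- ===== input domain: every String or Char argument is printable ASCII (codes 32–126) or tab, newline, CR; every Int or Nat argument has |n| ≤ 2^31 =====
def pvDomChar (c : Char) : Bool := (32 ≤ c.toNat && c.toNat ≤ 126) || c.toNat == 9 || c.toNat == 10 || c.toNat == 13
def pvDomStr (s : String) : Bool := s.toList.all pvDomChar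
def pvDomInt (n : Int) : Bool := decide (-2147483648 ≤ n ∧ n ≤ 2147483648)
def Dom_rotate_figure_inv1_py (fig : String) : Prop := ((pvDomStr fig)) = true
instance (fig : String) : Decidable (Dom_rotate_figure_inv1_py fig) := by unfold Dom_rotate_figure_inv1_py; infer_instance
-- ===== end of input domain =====

-- B replaces A's positions/intervals round-trip (which cancels) by one digit-validity
-- check and direct string assembly; objective: simpler, same O(n) cost.

-- ===== PORT A =====

-- STRING_ALPHABET = {str(n): n for n in range(1, 10)}
def pvAlphabet : PySem.Dict String Int :=
  (PySem.List.pyRange 1 10 1).foldl (fun d n => d.insert (PySem.Int.toStr n) n) PySem.Dict.empty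

-- _INV = {v: k for k, v in STRING_ALPHABET.items()}
def pvInv : PySem.Dict Int String :=
  pvAlphabet.items.foldl (fun d kv => d.insert kv.2 kv.1) PySem.Dict.empty

-- for ch in fig[1:]: positions.append(positions[-1] + int(ch) - 1); ValueError → none
-- (positions[-1] via pyGetD: positions starts as [start] and only grows, so it is never empty)
def pvPosLoop : List Char → List Int → Option (List Int)
  | [], positions => some positions
  | ch :: rest, positions =>
    match PySem.Int.ofChars? [ch] with
    | none => none
    | some v => pvPosLoop rest (positions ++ [PySem.List.pyGetD positions (-1) 0 + v - 1])

-- for a, b in zip(new_positions, new_positions[1:]): d = b - a + 1; guard; append str(d)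
def pvTailLoop : List (Int × Int) → List (List Char) → Option (List (List Char))
  | [], acc => some acc
  | (a, b) :: rest, acc =>
    let d := b - a + 1
    if d < 1 ∨ d > 9 then none
    else pvTailLoop rest (acc ++ [PySem.Int.toChars d])

def rotate_figure_inv1_py (fig : String) : String :=
  let cs := fig.toList
  if cs.length < 2 then fig  -- 'not fig or len(fig) < 2'
  else
    -- fig[0] via pyGetD: in range since len ≥ 2
    match pvAlphabet.get? (String.mk [PySem.List.pyGetD cs 0 ' ']) with
    | none => fig  -- KeyError
    | some start =>
      match pvPosLoop (PySem.List.slice cs (some 1) none) [start] with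
      | none => fig  -- ValueError
      | some positions =>
        -- intervals[i] = positions[i+1] - positions[i] + 1 (indices in range by construction)
        let intervals := (List.range (positions.length - 1)).map
          (fun i => positions.getD (i + 1) 0 - positions.getD i 0 + 1)
        let new_top := PySem.List.pyGetD positions (-1) 0 + intervals.getD 0 0 - 1
        let new_positions := PySem.List.slice positions (some 1) none ++ [new_top]
        match pvInv.get? (new_positions.getD 0 0) with
        | none => fig
        | some head =>
          match pvTailLoop (new_positions.zip (new_positions.drop 1)) [] with
          | none => fig
          | some tail_chars => String.mk (head.toList ++ PySem.Chars.join [] tail_chars)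

-- ===== PORT B =====
def rotate_figure_inv1_py_alt (fig : String) : String :=
  let cs := fig.toList
  if cs.length < 2 ∨ ¬ (cs.all fun c => decide ('1' ≤ c ∧ c ≤ '9')) then fig
  else
    -- int(fig[0]), int(fig[1]): both are digits here, so int() succeeds (getD is never taken)
    let head := (PySem.Int.ofChars? [PySem.List.pyGetD cs 0 ' ']).getD 0
              + (PySem.Int.ofChars? [PySem.List.pyGetD cs 1 ' ']).getD 0 - 1
    if head > 9 then fig
    else String.mk (PySem.Int.toChars head ++ PySem.List.slice cs (some 2) none
                    ++ [PySem.List.pyGetD cs 1 ' '])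

-- ===== PRECONDITION & SPEC =====
def Spec_rotate_figure_inv1_py (fig : String) (out : String) : Prop := out = rotate_figure_inv1_py_alt fig
instance (fig : String) (out : String) : Decidable (Spec_rotate_figure_inv1_py fig out) := by unfold Spec_rotate_figure_inv1_py; infer_instance

-- ===== CLAIM (what is proved, stated in full; the proofs are below) =====
def Claim_equal_rotate_figure_inv1_py : Prop := ∀ (fig : String), Dom_rotate_figure_inv1_py fig → Spec_rotate_figure_inv1_py fig (rotate_figure_inv1_py fig)

-- ===== LEMMAS AND PROOFS =====

-- digit value int(c) of a digit char
def pvVal (c : Char) : Int := (c.toNat : Int) - 48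

-- the position chain A builds: each step adds int(c) - 1
def pvSums (a : Int) : List Char → List Int
  | [] => []
  | c :: cs => (a + pvVal c - 1) :: pvSums (a + pvVal c - 1) cs

def pvLast (a : Int) : List Char → Int
  | [] => a
  | c :: cs => pvLast (a + pvVal c - 1) cs

def pvDiffs : Int → List Int → List Int
  | _, [] => []
  | a, b :: bs => (b - a + 1) :: pvDiffs b bs

-- facts about a single printable-ASCII char, proved by enumeration
theorem pvCharFacts (c : Char) (h : pvDomChar c = true) :
    (PySem.Int.ofChars? [c] = if '0' ≤ c ∧ c ≤ '9' then some (pvVal c) else none)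
    ∧ (pvAlphabet.get? (String.mk [c]) = if '1' ≤ c ∧ c ≤ '9' then some (pvVal c) else none)
    ∧ (('1' ≤ c ∧ c ≤ '9') → PySem.Int.toChars (pvVal c) = [c])
    ∧ ('0' ≤ c ↔ 48 ≤ c.toNat) ∧ (c ≤ '9' ↔ c.toNat ≤ 57) ∧ ('1' ≤ c ↔ 49 ≤ c.toNat) := by
  have hb : 9 ≤ c.toNat ∧ c.toNat ≤ 126 := by simp [pvDomChar] at h; omega
  have hofn := Char.ofNat_toNat c
  set n := c.toNat with hn
  obtain ⟨h1, h2⟩ := hb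
  rw [← hofn]
  unfold pvVal
  interval_cases n <;> decide

theorem pvInvFacts (v : Int) (h0 : 0 ≤ v) (h1 : v ≤ 17) :
    pvInv.get? v = if 1 ≤ v ∧ v ≤ 9 then some (PySem.Int.toStr v) else none := by
  interval_cases v <;> decide

theorem pvSums_length (a : Int) (cs : List Char) : (pvSums a cs).length = cs.length := by
  induction cs generalizing a with
  | nil => rfl
  | cons c cs ih => simp [pvSums, ih]

theorem pvPosLoop_none (cs : List Char) (pos : List Int)
    (hd : ∀ c ∈ cs, pvDomChar c = true)
    (hx : ∃ c ∈ cs, ¬ ('0' ≤ c ∧ c ≤ '9')) : pvPosLoop cs pos = none := by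
  induction cs generalizing pos with
  | nil => simp at hx
  | cons c cs ih =>
    have hc := (pvCharFacts c (hd c (by simp))).1
    by_cases hdig : '0' ≤ c ∧ c ≤ '9'
    · rw [if_pos hdig] at hc
      simp only [pvPosLoop, hc]
      exact ih _ (fun x hx => hd x (by simp [hx]))
        (by rcases hx with ⟨x, hx1, hx2⟩; rw [List.mem_cons] at hx1
            rcases hx1 with h | h
            · exact absurd hdig (h ▸ hx2)
            · exact ⟨x, h, hx2⟩)
    · rw [if_neg hdig] at hc
      simp [pvPosLoop, hc]

theorem pvPosLoop_some (cs : List Char) (pre : List Int) (a : Int)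
    (hd : ∀ c ∈ cs, pvDomChar c = true)
    (hdig : ∀ c ∈ cs, '0' ≤ c ∧ c ≤ '9') :
    pvPosLoop cs (pre ++ [a]) = some ((pre ++ [a]) ++ pvSums a cs) := by
  induction cs generalizing pre a with
  | nil => simp [pvPosLoop, pvSums]
  | cons c cs ih =>
    have hc := (pvCharFacts c (hd c (by simp))).1
    rw [if_pos (hdig c (by simp))] at hc
    simp only [pvPosLoop, hc, PySem.List.pyGetD_neg_one_append_singleton]
    have := ih (pre ++ [a]) (a + pvVal c - 1)
      (fun x hx => hd x (by simp [hx])) (fun x hx => hdig x (by simp [hx]))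
    rw [this]
    simp [pvSums]

theorem pvSums_getLast? (cs : List Char) (a : Int) (h : cs ≠ []) :
    (pvSums a cs).getLast? = some (pvLast a cs) := by
  induction cs generalizing a with
  | nil => exact absurd rfl h
  | cons c cs ih =>
    rcases cs with _ | ⟨c2, cs2⟩
    · simp [pvSums, pvLast]
    · show ((a + pvVal c - 1) :: pvSums (a + pvVal c - 1) (c2 :: cs2)).getLast? = _
      have hrfl : pvSums (a + pvVal c - 1) (c2 :: cs2)
          = (a + pvVal c - 1 + pvVal c2 - 1) :: pvSums (a + pvVal c - 1 + pvVal c2 - 1) cs2 := rfl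
      rw [hrfl, List.getLast?_cons_cons, ← hrfl]
      exact ih _ (by simp)

theorem pvLast_getLast (cs : List Char) (a x : Int) (h : cs ≠ []) :
    PySem.List.pyGetD (x :: pvSums a cs) (-1) 0 = pvLast a cs := by
  have h2 : pvSums a cs ≠ [] := by
    cases cs with
    | nil => exact absurd rfl h
    | cons c cs => simp [pvSums]
  rw [PySem.List.pyGetD_neg_one]
  · rw [List.getLast_cons h2]
    have h3 := List.getLast?_eq_some_getLast h2
    rw [pvSums_getLast? cs a h] at h3
    exact (Option.some.inj h3).symm
  · simp

theorem pvTailLoop_diffs (xs : List Int) (a : Int) (acc : List (List Char)) :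
    pvTailLoop ((a :: xs).zip xs) acc =
      if (pvDiffs a xs).all (fun d => decide (1 ≤ d ∧ d ≤ 9))
      then some (acc ++ (pvDiffs a xs).map PySem.Int.toChars) else none := by
  induction xs generalizing a acc with
  | nil => simp [pvTailLoop, pvDiffs]
  | cons b bs ih =>
    simp only [List.zip_cons_cons, pvTailLoop, pvDiffs]
    by_cases hg : b - a + 1 < 1 ∨ b - a + 1 > 9
    · simp
      split_ifs with h1 h2
      · exfalso; rcases h2 with ⟨⟨u, v⟩, -⟩; omega
      · rfl
      · exfalso; omega
      · exfalso; omega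
    · rw [if_neg hg, ih]
      have h19 : 1 ≤ b - a + 1 ∧ b - a + 1 ≤ 9 := by omega
      simp [h19]

theorem pvDiffs_chain (cs : List Char) (a e : Int) :
    pvDiffs a (pvSums a cs ++ [pvLast a cs + e]) = cs.map pvVal ++ [e + 1] := by
  induction cs generalizing a with
  | nil => simp [pvSums, pvLast, pvDiffs]
  | cons c cs ih =>
    simp only [pvSums, pvLast, List.cons_append, pvDiffs, List.map_cons, ih]
    congr 1
    omega

-- a digit value is in 1..9 iff the char is in '1'..'9'
theorem pvValDigit (c : Char) (h : pvDomChar c = true) :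
    (1 ≤ pvVal c ∧ pvVal c ≤ 9) ↔ ('1' ≤ c ∧ c ≤ '9') := by
  obtain ⟨-, -, -, -, hn, ho⟩ := pvCharFacts c h
  unfold pvVal
  rw [hn, ho]
  omega

-- B's value when the digit check passes
theorem pvAltVal (fig : String) (c0 c1 : Char) (rest : List Char)
    (hcs : fig.toList = c0 :: c1 :: rest)
    (hd0 : pvDomChar c0 = true) (hd1 : pvDomChar c1 = true)
    (hall : ((c0 :: c1 :: rest).all fun c => decide ('1' ≤ c ∧ c ≤ '9')) = true) :
    rotate_figure_inv1_py_alt fig =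
      if pvVal c0 + pvVal c1 - 1 > 9 then fig
      else String.mk (PySem.Int.toChars (pvVal c0 + pvVal c1 - 1) ++ rest ++ [c1]) := by
  have h0 : '1' ≤ c0 ∧ c0 ≤ '9' := by
    have := hall; simp [List.all_cons] at this; tauto
  have h1 : '1' ≤ c1 ∧ c1 ≤ '9' := by
    have := hall; simp [List.all_cons] at this; tauto
  obtain ⟨hof0, -, -, hzero0, -, hone0⟩ := pvCharFacts c0 hd0
  obtain ⟨hof1, -, -, hzero1, -, hone1⟩ := pvCharFacts c1 hd1
  rw [if_pos ⟨hzero0.mpr (by have := hone0.mp h0.1; omega), h0.2⟩] at hof0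
  rw [if_pos ⟨hzero1.mpr (by have := hone1.mp h1.1; omega), h1.2⟩] at hof1
  simp only [rotate_figure_inv1_py_alt, hcs]
  rw [if_neg (by push_neg; exact ⟨by simp, hall⟩)]
  rw [PySem.List.pyGetD_zero_cons]
  rw [show PySem.List.pyGetD (c0 :: c1 :: rest) 1 ' ' = c1 by
    simp [PySem.List.pyGetD, PySem.List.pyGet?, PySem.List.pyIdx?]]
  rw [hof0, hof1]
  rw [PySem.List.slice_from _ (by norm_num)]
  simp only [Option.getD_some]
  rfl

-- B returns fig when the digit check fails
theorem pvAltFig (fig : String) (c0 c1 : Char) (rest : List Char)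
    (hcs : fig.toList = c0 :: c1 :: rest)
    (h : ¬ (((c0 :: c1 :: rest).all fun c => decide ('1' ≤ c ∧ c ≤ '9')) = true)) :
    rotate_figure_inv1_py_alt fig = fig := by
  simp only [rotate_figure_inv1_py_alt, hcs]
  rw [if_pos (Or.inr h)]

-- ===== VERDICT (by name: the statement is the Claim_ definition above) =====
theorem rotate_figure_inv1_py_spec : Claim_equal_rotate_figure_inv1_py := by
  intro fig hdom
  have hdomall : ∀ c ∈ fig.toList, pvDomChar c = true := by
    have h := hdom
    unfold Dom_rotate_figure_inv1_py pvDomStr at h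
    simpa [List.all_eq_true] using h
  unfold Spec_rotate_figure_inv1_py
  rcases hcs : fig.toList with _ | ⟨c0, cs1⟩
  · simp [rotate_figure_inv1_py, rotate_figure_inv1_py_alt, hcs]
  rcases cs1 with _ | ⟨c1, rest⟩
  · simp [rotate_figure_inv1_py, rotate_figure_inv1_py_alt, hcs]
  rw [hcs] at hdomall
  have hd0 : pvDomChar c0 = true := hdomall c0 (by simp)
  have hd1 : pvDomChar c1 = true := hdomall c1 (by simp)
  have hdrest : ∀ c ∈ rest, pvDomChar c = true := fun c hc => hdomall c (by simp [hc])
  obtain ⟨hof0, halpha0, hto0, hzero0, hnine0, hone0⟩ := pvCharFacts c0 hd0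
  obtain ⟨hof1, halpha1, hto1, hzero1, hnine1, hone1⟩ := pvCharFacts c1 hd1
  -- A side: unfold and discharge the length test and fig[0]
  simp only [rotate_figure_inv1_py, hcs]
  rw [if_neg (by simp)]
  rw [PySem.List.pyGetD_zero_cons]
  by_cases h0 : '1' ≤ c0 ∧ c0 ≤ '9'
  case neg =>
    -- KeyError on fig[0]: both return fig
    rw [halpha0, if_neg h0]
    refine (pvAltFig fig c0 c1 rest hcs ?_).symm
    simp only [List.all_cons, Bool.and_eq_true, decide_eq_true_eq]
    exact fun h => h0 h.1
  case pos =>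
  rw [halpha0, if_pos h0]
  rw [PySem.List.slice_from _ (by norm_num)]
  have hdrop : List.drop (Int.toNat 1) (c0 :: c1 :: rest) = c1 :: rest := rfl
  rw [hdrop]
  dsimp only
  by_cases hdig : ∀ c ∈ c1 :: rest, '0' ≤ c ∧ c ≤ '9'
  case neg =>
    -- int(ch) raises somewhere: both return fig
    have hdig' : ∃ c ∈ c1 :: rest, ¬ ('0' ≤ c ∧ c ≤ '9') := by
      by_contra hno
      push_neg at hno
      exact hdig hno
    obtain ⟨c, hcmem, hcbad⟩ := hdig'
    rw [pvPosLoop_none (c1 :: rest) [pvVal c0] (fun x hx => by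
          rcases List.mem_cons.mp hx with h | h
          · exact h ▸ hd1
          · exact hdrest x h)
        ⟨c, hcmem, hcbad⟩]
    refine (pvAltFig fig c0 c1 rest hcs ?_).symm
    simp only [List.all_eq_true, not_forall]
    have hdcd : pvDomChar c = true := by
      rcases List.mem_cons.mp hcmem with h | h
      · exact h ▸ hd1
      · exact hdrest c h
    obtain ⟨-, -, -, hzc, -, hoc⟩ := pvCharFacts c hdcd
    refine ⟨c, by simp [hcmem], ?_⟩
    simp only [decide_eq_true_eq]
    intro hr
    exact hcbad ⟨hzc.mpr (by have := hoc.mp hr.1; omega), hr.2⟩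
  case pos =>
  have hposloop := pvPosLoop_some (c1 :: rest) [] (pvVal c0)
    (fun x hx => by
      rcases List.mem_cons.mp hx with h | h
      · exact h ▸ hd1
      · exact hdrest x h) hdig
  simp only [List.nil_append] at hposloop
  -- positions = pvVal c0 :: pvSums (pvVal c0) (c1 :: rest)
  have hsums1 : pvSums (pvVal c0) (c1 :: rest)
      = (pvVal c0 + pvVal c1 - 1) :: pvSums (pvVal c0 + pvVal c1 - 1) rest := rfl
  rw [hposloop]
  dsimp only
  simp only [List.singleton_append]
  have hslice : PySem.List.slice (pvVal c0 :: pvSums (pvVal c0) (c1 :: rest)) (some 1) none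
      = pvSums (pvVal c0) (c1 :: rest) := by
    rw [PySem.List.slice_from _ (by norm_num)]
    rfl
  have hlast : PySem.List.pyGetD (pvVal c0 :: pvSums (pvVal c0) (c1 :: rest)) (-1) 0
      = pvLast (pvVal c0) (c1 :: rest) := pvLast_getLast _ _ _ (by simp)
  have hlen2 : (pvVal c0 :: pvSums (pvVal c0) (c1 :: rest)).length - 1 = rest.length + 1 := by
    simp [pvSums_length]
  rw [hslice, hlast, hlen2, List.range_succ_eq_map]
  simp only [List.map_cons, List.getD_cons_zero]
  have hint : (pvVal c0 :: pvSums (pvVal c0) (c1 :: rest)).getD (0 + 1) 0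
      - pvVal c0 + 1 = pvVal c1 := by
    rw [hsums1]
    simp only [List.getD_cons_succ, List.getD_cons_zero]
    omega
  rw [hint]
  have hpl : pvLast (pvVal c0) (c1 :: rest) = pvLast (pvVal c0 + pvVal c1 - 1) rest := rfl
  rw [hpl]
  have hnt : pvLast (pvVal c0 + pvVal c1 - 1) rest + pvVal c1 - 1
      = pvLast (pvVal c0 + pvVal c1 - 1) rest + (pvVal c1 - 1) := by ring
  rw [hnt, hsums1, List.cons_append, List.getD_cons_zero]
  -- bounds for the digit values
  have hc1dig : '0' ≤ c1 ∧ c1 ≤ '9' := hdig c1 (by simp)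
  have hc0n : 49 ≤ c0.toNat ∧ c0.toNat ≤ 57 := ⟨hone0.mp h0.1, hnine0.mp h0.2⟩
  have hc1n : 48 ≤ c1.toNat ∧ c1.toNat ≤ 57 := ⟨hzero1.mp hc1dig.1, hnine1.mp hc1dig.2⟩
  have hv0 : 1 ≤ pvVal c0 ∧ pvVal c0 ≤ 9 := by unfold pvVal; omega
  have hv1 : 0 ≤ pvVal c1 ∧ pvVal c1 ≤ 9 := by unfold pvVal; omega
  rw [pvInvFacts _ (by omega) (by omega)]
  by_cases hs1 : 1 ≤ pvVal c0 + pvVal c1 - 1 ∧ pvVal c0 + pvVal c1 - 1 ≤ 9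
  case neg =>
    rw [if_neg hs1]
    by_cases hallB : ((c0 :: c1 :: rest).all fun c => decide ('1' ≤ c ∧ c ≤ '9')) = true
    · rw [pvAltVal fig c0 c1 rest hcs hd0 hd1 hallB]
      have h1c1 : '1' ≤ c1 ∧ c1 ≤ '9' := by
        simp only [List.all_cons, Bool.and_eq_true, decide_eq_true_eq] at hallB
        exact hallB.2.1
      have hval1 : 1 ≤ pvVal c1 ∧ pvVal c1 ≤ 9 := (pvValDigit c1 hd1).mpr h1c1
      rw [if_pos (by omega)]
    · rw [pvAltFig fig c0 c1 rest hcs hallB]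
  case pos =>
  rw [if_pos hs1]
  dsimp only
  simp only [List.drop_succ_cons, List.drop_zero]
  rw [pvTailLoop_diffs, pvDiffs_chain rest (pvVal c0 + pvVal c1 - 1) (pvVal c1 - 1)]
  have he1 : pvVal c1 - 1 + 1 = pvVal c1 := by ring
  rw [he1]
  by_cases hallB : ((c0 :: c1 :: rest).all fun c => decide ('1' ≤ c ∧ c ≤ '9')) = true
  · -- everything valid: both build the rotated figure
    simp only [List.all_cons, Bool.and_eq_true, decide_eq_true_eq, List.all_eq_true] at hallB
    obtain ⟨-, h1c1, h1rest⟩ := hallB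
    have hAcond : ((rest.map pvVal ++ [pvVal c1]).all fun d => decide (1 ≤ d ∧ d ≤ 9)) = true := by
      simp only [List.all_append, List.all_map, Bool.and_eq_true, List.all_eq_true,
        Function.comp, decide_eq_true_eq, List.all_cons, List.all_nil, Bool.and_true]
      constructor
      · intro c hc
        exact (pvValDigit c (hdrest c hc)).mpr (by simpa using h1rest c hc)
      · exact (pvValDigit c1 hd1).mpr h1c1
    rw [if_pos hAcond]
    dsimp only
    have hallB' : ((c0 :: c1 :: rest).all fun c => decide ('1' ≤ c ∧ c ≤ '9')) = true := by
      simp only [List.all_cons, Bool.and_eq_true, decide_eq_true_eq, List.all_eq_true]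
      exact ⟨h0, h1c1, h1rest⟩
    rw [pvAltVal fig c0 c1 rest hcs hd0 hd1 hallB', if_neg (by omega)]
    -- the strings coincide
    have hmapsingle : (rest.map pvVal ++ [pvVal c1]).map PySem.Int.toChars
        = (rest ++ [c1]).map (fun c => [c]) := by
      rw [List.map_append, List.map_append, List.map_map]
      congr 1
      · apply List.map_congr_left
        intro c hc
        obtain ⟨-, -, htoc, -, -, -⟩ := pvCharFacts c (hdrest c hc)
        exact htoc (by simpa using h1rest c hc)
      · simp [hto1 h1c1]
    rw [hmapsingle]
    simp only [List.nil_append]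
    rw [PySem.Chars.join_nil_singletons, PySem.Int.toList_toStr]
    simp [List.append_assoc]
  · -- some digit outside 1..9: both return the figure unchanged
    rw [pvAltFig fig c0 c1 rest hcs hallB]
    have hbad : ∃ c ∈ c1 :: rest, ¬ ('1' ≤ c ∧ c ≤ '9') := by
      by_contra hno
      push_neg at hno
      apply hallB
      simp only [List.all_cons, Bool.and_eq_true, decide_eq_true_eq, List.all_eq_true]
      exact ⟨h0, hno c1 (by simp), fun c hc => hno c (by simp [hc])⟩
    obtain ⟨c, hcmem, hcbad⟩ := hbad
    have hAcond : ((rest.map pvVal ++ [pvVal c1]).all fun d => decide (1 ≤ d ∧ d ≤ 9)) = false := by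
      rcases List.mem_cons.mp hcmem with hcc | hcc
      · refine List.all_eq_false.mpr ⟨pvVal c1, by simp, ?_⟩
        simp only [decide_eq_true_eq]
        intro hr
        exact hcbad (hcc ▸ (pvValDigit c1 hd1).mp hr)
      · refine List.all_eq_false.mpr ⟨pvVal c, by simp [List.mem_append]; exact Or.inl ⟨c, hcc, rfl⟩, ?_⟩
        simp only [decide_eq_true_eq]
        intro hr
        exact hcbad ((pvValDigit c (hdrest c hcc)).mp hr)
    rw [hAcond]
    simp
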